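-- pv_equiv track=rewrite | github.com/wilhelmklopp/Project-String | project_string/pstring/generator.py | generate
-- ===== SOURCE A (Python) =====
-- import math
--
-- alphabet = ["-", "b","c","d","f","g","h","j","k","m","n","p","q","r","s","t","v","w","x","y","z","B","C","D","F","G","H","J","K","M","N","P","Q","R","S","T","V","W","X","Y","3","4","5","6","7","8","9"]
--
-- def generate(iv):
--     #iv = index value in database
--     short = []
--     final = ""
--     interrupt = False
--     for i in range(0, 7):
--         short.append(alphabet[iv%len(alphabet)])
--         iv = int(math.floor(iv/len(alphabet)))
--     for i in range(len(short)-1, -1, -1):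
--         if short[i] == "-":
--             if interrupt == False:
--                 short.pop(i)
--         else:
--              interrupt = True
--     for i in short:
--         final = final + i
--     return (final)
-- ===== SOURCE B (Python) =====
-- ALPHABET = "-bcdfghjkmnpqrstvwxyzBCDFGHJKMNPQRSTVWXY3456789"
--
-- def generate(iv):
--     # Recursive base-47 conversion driven by the value itself: recursion stops
--     # when the value runs out (budget caps at the 7 digits A ever produces),
--     # so the zero pad digits are never emitted and no stripping pass is needed.
--     def enc(v, budget):
--         if budget == 0 or v == 0:
--             return ""
--         return ALPHABET[v % 47] + enc(v // 47, budget - 1)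
--     return enc(iv, 7)
-- ===== Notes on version B (the rewrite author's own statement) =====
-- stated objective: simpler
-- what changed: B replaces A's fixed-7-digit build + reverse-scan pop-stripping + concatenation loop (three passes and an interrupt flag) by a single value-driven recursion that stops as soon as the value runs out, so the pad digits are never produced and no stripping exists at all.
import Mathlib
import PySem

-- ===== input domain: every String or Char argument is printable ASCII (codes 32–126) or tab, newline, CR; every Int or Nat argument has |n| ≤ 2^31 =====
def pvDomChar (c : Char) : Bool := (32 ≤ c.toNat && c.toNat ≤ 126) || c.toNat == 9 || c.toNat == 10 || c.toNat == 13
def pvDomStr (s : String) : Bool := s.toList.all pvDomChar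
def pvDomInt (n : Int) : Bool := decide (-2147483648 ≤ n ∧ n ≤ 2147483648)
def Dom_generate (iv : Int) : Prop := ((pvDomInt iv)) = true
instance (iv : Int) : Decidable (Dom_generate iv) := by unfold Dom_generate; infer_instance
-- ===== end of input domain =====

-- B is a value-driven recursive base-47 conversion that stops when the value runs out, so A's pad digits
-- and its whole stripping pass never exist; same return value on the stated domain.

-- ===== PORT A =====
def pvAlphabet : List String := ["-", "b","c","d","f","g","h","j","k","m","n","p","q","r","s","t","v","w","x","y","z","B","C","D","F","G","H","J","K","M","N","P","Q","R","S","T","V","W","X","Y","3","4","5","6","7","8","9"]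

-- one iteration of A's second loop: for i in range(len(short)-1, -1, -1): …
def pvStripStep (st : List String × Bool) (i : Int) : List String × Bool :=
  if PySem.List.pyGetD st.1 i "" == "-" then
    if st.2 == false then (((PySem.List.pop? st.1 i).map (·.2)).getD st.1, st.2)
    else st
  else (st.1, true)

def generate (iv : Int) : String :=
  -- int(math.floor(iv/len(alphabet))) is ported as integer floor division; exact on the stated
  -- domain |iv| ≤ 2^31 (the float quotient never rounds across an integer there).
  let s1 := (PySem.List.pyRange 0 7 1).foldl
    (fun (st : List String × Int) _ =>
      (st.1 ++ [PySem.List.pyGetD pvAlphabet (PySem.Int.mod st.2 47) ""],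
       PySem.Int.floordiv st.2 47))
    ([], iv)
  let s2 := (PySem.List.pyRange ((s1.1.length : Int) - 1) (-1) (-1)).foldl pvStripStep (s1.1, false)
  s2.1.foldl (fun acc x => acc ++ x) ""

-- ===== PORT B =====
def pvALPHABET : String := "-bcdfghjkmnpqrstvwxyzBCDFGHJKMNPQRSTVWXY3456789"

-- ALPHABET[v % 47] (always in range, so the default is never used)
def pvDchar (v : Int) : Char := (PySem.Str.pyGet? pvALPHABET (PySem.Int.mod v 47)).getD ' '

-- enc(v, budget): "" when budget == 0 or v == 0, else ALPHABET[v % 47] + enc(v // 47, budget - 1)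
def pvEnc : Int → Nat → String
  | _, 0 => ""
  | v, b + 1 =>
    if v = 0 then ""
    else String.singleton (pvDchar v) ++ pvEnc (PySem.Int.floordiv v 47) b

def generate_alt (iv : Int) : String := pvEnc iv 7


-- ===== PRECONDITION & SPEC =====
def Spec_generate (iv : Int) (out : String) : Prop := out = generate_alt iv
instance (iv : Int) (out : String) : Decidable (Spec_generate iv out) := by unfold Spec_generate; infer_instance

-- ===== CLAIM (what is proved, stated in full; the proofs are below) =====
def Claim_equal_generate : Prop := ∀ (iv : Int), Dom_generate iv → Spec_generate iv (generate iv)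

-- ===== LEMMAS AND PROOFS =====
-- unfolding equation for pvEnc at a positive budget
theorem pvEnc_succ (v : Int) (b : Nat) :
    pvEnc v (b + 1) =
      if v = 0 then "" else String.singleton (pvDchar v) ++ pvEnc (PySem.Int.floordiv v 47) b := rfl

-- iv after n floor divisions by 47
def pvFdivIter (v : Int) : Nat → Int
  | 0 => v
  | n + 1 => pvFdivIter (PySem.Int.floordiv v 47) n

-- the digit characters A's first loop produces, least significant first
def pvDigits (v : Int) : Nat → List Char
  | 0 => []
  | n + 1 => pvDchar v :: pvDigits (PySem.Int.floordiv v 47) n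

theorem pvFdivIter_succ_right (n : Nat) (v : Int) :
    pvFdivIter v (n + 1) = PySem.Int.floordiv (pvFdivIter v n) 47 := by
  induction n generalizing v with
  | zero => rfl
  | succ n ih => exact ih (PySem.Int.floordiv v 47)

theorem pvDigits_snoc (n : Nat) (v : Int) :
    pvDigits v (n + 1) = pvDigits v n ++ [pvDchar (pvFdivIter v n)] := by
  induction n generalizing v with
  | zero => rfl
  | succ n ih =>
    show pvDchar v :: pvDigits (PySem.Int.floordiv v 47) (n + 1) = _
    rw [ih]
    rfl

-- both ports fetch the same digit: A's alphabet entry is the singleton string of B's character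
theorem pv_digit_eq (v : Int) :
    PySem.List.pyGetD pvAlphabet (PySem.Int.mod v 47) "" = String.singleton (pvDchar v) := by
  unfold pvDchar
  have h0 : 0 ≤ PySem.Int.mod v 47 := PySem.Int.mod_nonneg v (by norm_num)
  have h1 : PySem.Int.mod v 47 < 47 := PySem.Int.mod_lt v (by norm_num)
  obtain ⟨k, hk⟩ := Int.eq_ofNat_of_zero_le h0
  have hk47 : k < 47 := by omega
  rw [hk]
  clear hk h0 h1
  revert k
  decide

-- A's first loop = B's digit characters (as singleton strings) plus the remaining value
theorem pv_firstloop (n : Nat) (iv : Int) :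
    (PySem.List.pyRange 0 (n : Int) 1).foldl
      (fun (st : List String × Int) _ =>
        (st.1 ++ [PySem.List.pyGetD pvAlphabet (PySem.Int.mod st.2 47) ""],
         PySem.Int.floordiv st.2 47)) ([], iv) =
      ((pvDigits iv n).map String.singleton, pvFdivIter iv n) := by
  induction n with
  | zero => simp [PySem.List.pyRange_one_eq_nil (le_refl (0 : Int)), pvDigits, pvFdivIter]
  | succ n ih =>
    have hr : PySem.List.pyRange 0 ((n + 1 : Nat) : Int) 1
        = PySem.List.pyRange 0 (n : Int) 1 ++ [(n : Int)] := by
      push_cast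
      exact PySem.List.pyRange_one_succ_right (by positivity)
    rw [hr, List.foldl_append, ih]
    simp only [List.foldl_cons, List.foldl_nil]
    rw [pv_digit_eq, pvDigits_snoc, pvFdivIter_succ_right]
    simp

-- once interrupt is True, A's strip loop leaves the state unchanged
theorem pv_strip_const (idxs : List Int) (l : List String) :
    idxs.foldl pvStripStep (l, true) = (l, true) := by
  induction idxs generalizing l with
  | nil => rfl
  | cons i is ih =>
      have hstep : pvStripStep (l, true) i = (l, true) := by
        unfold pvStripStep; split <;> simp
      simp [List.foldl_cons, hstep, ih]

-- A's reverse-scan/pop strip loop removes exactly the trailing "-" entries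
theorem pv_striploop (l : List String) :
    ((PySem.List.pyRange ((l.length : Int) - 1) (-1) (-1)).foldl pvStripStep (l, false)).1 =
      (l.reverse.dropWhile (· == "-")).reverse := by
  induction l using List.reverseRecOn with
  | nil =>
      simp [PySem.List.pyRange_neg_one_eq_nil (le_refl (-1 : Int))]
  | append_singleton ys y ih =>
      have hlen : (((ys ++ [y]).length : Int)) - 1 = (ys.length : Int) := by
        simp
      rw [hlen, PySem.List.pyRange_neg_one_cons (show (-1 : Int) < (ys.length : Int) by omega),
        List.foldl_cons]
      have hget : PySem.List.pyGetD (ys ++ [y]) (ys.length : Int) "" = y := by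
        rw [PySem.List.pyGetD_of_nonneg _ _ (by positivity)]
        simp only [Int.toNat_natCast]
        rw [List.getD_eq_getElem?_getD]
        simp
      have hpop : PySem.List.pop? (ys ++ [y]) (ys.length : Int) = some (y, ys) := by
        have h := PySem.List.pop?_natCast (ys ++ [y]) ys.length (by simp)
        rw [List.eraseIdx_append_of_length_le (le_refl _)] at h
        simpa using h
      by_cases hy : y = "-"
      · subst hy
        have hstep : pvStripStep (ys ++ ["-"], false) (ys.length : Int) = (ys, false) := by
          unfold pvStripStep
          simp [hget, hpop]
        rw [hstep]
        simpa using ih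
      · have hstep : pvStripStep (ys ++ [y], false) (ys.length : Int) = (ys ++ [y], true) := by
          unfold pvStripStep
          simp [hget, hy]
        rw [hstep, pv_strip_const]
        simp [hy]

-- A's concatenation loop over singleton strings is String.ofList
theorem pv_concat (cs : List Char) (acc : String) :
    (cs.map String.singleton).foldl (fun a x => a ++ x) acc = acc ++ String.ofList cs := by
  induction cs generalizing acc with
  | nil => simp
  | cons c cs ih =>
      simp only [List.map_cons, List.foldl_cons, ih]
      apply String.toList_injective
      simp

theorem pv_singleton_beq (c : Char) : (String.singleton c == "-") = (c == '-') := by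
  by_cases h : c = '-'
  · subst h; rfl
  · have hs : String.singleton c ≠ "-" := by
      intro he
      exact h (by simpa using congrArg String.toList he)
    simp [hs, h]

-- a nonzero digit index never yields the pad character '-'
theorem pv_dchar_ne (v : Int) (h : PySem.Int.mod v 47 ≠ 0) : (pvDchar v == '-') = false := by
  unfold pvDchar
  have h0 : 0 ≤ PySem.Int.mod v 47 := PySem.Int.mod_nonneg v (by norm_num)
  have h1 : PySem.Int.mod v 47 < 47 := PySem.Int.mod_lt v (by norm_num)
  obtain ⟨k, hk⟩ := Int.eq_ofNat_of_zero_le h0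
  rw [hk] at h ⊢
  have hk47 : k < 47 := by omega
  have hkne : k ≠ 0 := by omega
  clear hk h0 h1 h
  revert k
  decide

theorem pvDigits_zero (n : Nat) : pvDigits 0 n = List.replicate n '-' := by
  induction n with
  | zero => rfl
  | succ n ih =>
    show pvDchar 0 :: pvDigits (PySem.Int.floordiv 0 47) n = _
    rw [show PySem.Int.floordiv 0 47 = 0 from by decide, ih]
    rfl

theorem pv_drop_replicate (n : Nat) :
    (List.replicate n '-').dropWhile (· == '-') = [] := by
  induction n with
  | zero => rfl
  | succ n ih => simp [List.replicate_succ, ih]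

theorem pvEnc_toList_nil (m : Nat) (r : Int) (h : (pvEnc r (m + 1)).toList = []) : r = 0 := by
  by_contra hr
  rw [pvEnc_succ, if_neg hr] at h
  simp at h

-- the heart: A's strip of the fixed digit list equals B's value-driven recursion,
-- provided the value left after n-1 divisions is 0 or has a nonzero low digit
theorem pv_main (n : Nat) (v : Int)
    (H : n ≠ 0 → pvFdivIter v (n - 1) = 0 ∨ PySem.Int.mod (pvFdivIter v (n - 1)) 47 ≠ 0) :
    ((pvDigits v n).reverse.dropWhile (· == '-')).reverse = (pvEnc v n).toList := by
  induction n generalizing v with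
  | zero => rfl
  | succ n ih =>
    by_cases hv : v = 0
    · subst hv
      rw [pvDigits_zero, List.reverse_replicate, pv_drop_replicate]
      rfl
    · have henc : pvEnc v (n + 1)
          = String.singleton (pvDchar v) ++ pvEnc (PySem.Int.floordiv v 47) n := by
        rw [pvEnc_succ, if_neg hv]
      have hd : pvDigits v (n + 1) = pvDchar v :: pvDigits (PySem.Int.floordiv v 47) n := rfl
      have hIH : ((pvDigits (PySem.Int.floordiv v 47) n).reverse.dropWhile (· == '-')).reverse
          = (pvEnc (PySem.Int.floordiv v 47) n).toList := by
        apply ih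
        intro hn
        have := H (by omega)
        rcases n with _ | m
        · exact absurd rfl hn
        · exact this
      rw [hd, henc, List.reverse_cons, List.dropWhile_append]
      by_cases hL : ((pvDigits (PySem.Int.floordiv v 47) n).reverse.dropWhile (· == '-')).isEmpty
      · -- the recursive part strips/encodes to nothing
        have hLnil : (pvDigits (PySem.Int.floordiv v 47) n).reverse.dropWhile (· == '-') = [] :=
          List.isEmpty_iff.mp hL
        have hencnil : (pvEnc (PySem.Int.floordiv v 47) n).toList = [] := by
          rw [← hIH, hLnil]; rfl
        have hmod : PySem.Int.mod v 47 ≠ 0 := by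
          rcases n with _ | m
          · -- budget exhausted: H says the last value 0 or low digit nonzero; v ≠ 0
            have := H (by omega)
            simpa [pvFdivIter, hv] using this
          · -- v // 47 = 0 and v ≠ 0 force v % 47 ≠ 0
            have hq : PySem.Int.floordiv v 47 = 0 := pvEnc_toList_nil m _ hencnil
            have hsum := PySem.Int.floordiv_mul_add_mod v 47
            rw [hq] at hsum
            intro h0
            rw [h0] at hsum
            omega
        have hstr : pvEnc (PySem.Int.floordiv v 47) n = "" :=
          String.toList_injective (by rw [hencnil]; rfl)
        rw [if_pos hL, hstr]
        simp [pv_dchar_ne v hmod]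
      · rw [if_neg (by simpa using hL)]
        simp only [List.reverse_append, List.reverse_cons, List.reverse_nil, List.nil_append,
          List.singleton_append, hIH]
        simp

theorem pv_iter_zero (n : Nat) (v : Int) (h0 : 0 ≤ v) (h1 : v < 47 ^ n) :
    pvFdivIter v n = 0 := by
  induction n generalizing v with
  | zero =>
    show v = 0
    simp at h1
    omega
  | succ n ih =>
    show pvFdivIter (PySem.Int.floordiv v 47) n = 0
    apply ih
    · rw [PySem.Int.floordiv_eq_ediv_of_pos (by norm_num)]
      exact Int.ediv_nonneg h0 (by norm_num)
    · rw [PySem.Int.floordiv_lt_iff_lt_mul (by norm_num)]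
      calc v < 47 ^ (n + 1) := h1
        _ = 47 ^ n * 47 := by ring

theorem pv_iter_neg (n : Nat) (v : Int) (h0 : -(47 ^ n) ≤ v) (h1 : v ≤ -1) :
    pvFdivIter v n = -1 := by
  induction n generalizing v with
  | zero =>
    show v = -1
    simp at h0
    omega
  | succ n ih =>
    show pvFdivIter (PySem.Int.floordiv v 47) n = -1
    apply ih
    · rw [PySem.Int.le_floordiv_iff_mul_le (by norm_num)]
      calc -(47 ^ n) * 47 = -(47 ^ (n + 1)) := by ring
        _ ≤ v := h0
    · have : PySem.Int.floordiv v 47 < 0 := by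
        rw [PySem.Int.floordiv_lt_iff_lt_mul (by norm_num)]
        omega
      omega

-- ===== VERDICT (by name: the statement is the Claim_ definition above) =====
theorem generate_spec : Claim_equal_generate := by
  intro iv hdom
  show generate iv = generate_alt iv
  have hbound : -2147483648 ≤ iv ∧ iv ≤ 2147483648 := by
    simpa [Dom_generate, pvDomInt] using hdom
  simp only [generate, generate_alt]
  have hf := pv_firstloop 7 iv
  simp only [Nat.cast_ofNat] at hf
  simp only [hf]
  rw [pv_striploop]
  have hfun : ((fun x => x == "-") ∘ String.singleton) = (fun c : Char => c == '-') := by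
    funext c; exact pv_singleton_beq c
  rw [← List.map_reverse, List.dropWhile_map, hfun, ← List.map_reverse, pv_concat]
  have hH : (7 : Nat) ≠ 0 →
      pvFdivIter iv 6 = 0 ∨ PySem.Int.mod (pvFdivIter iv 6) 47 ≠ 0 := by
    intro _
    by_cases hge : 0 ≤ iv
    · left
      exact pv_iter_zero 6 iv hge (by norm_num; omega)
    · right
      rw [pv_iter_neg 6 iv (by norm_num; omega) (by omega)]
      decide
  rw [pv_main 7 iv hH]
  apply String.toList_injective
  simp
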